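-- pv_equiv track=rewrite | github.com/ramontramontini/CTEDemo | tests/backend/Cte/test_post_generation_validation.py | _build_xml_missing
-- ===== SOURCE A (Python) =====
-- def _build_xml_missing(element: str) -> str:
--     """Build XML with a specific required element removed."""
--     parts = {
--         "cteProc": True, "CTe": True, "infCte": True,
--         "ide": True, "emit": True, "rem": True,
--         "vPrest": True, "imp": True, "infCTeNorm": True,
--     }
--     parts[element] = False
--
--     inner = ""
--     for tag in ["ide", "emit", "rem", "vPrest", "imp", "infCTeNorm"]:
--         if parts[tag]:
--             inner += f"<{tag}/>"
--
--     xml = '<?xml version="1.0" encoding="UTF-8"?>'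
--     if not parts["cteProc"]:
--         xml += f"<root><CTe><infCte>{inner}</infCte></CTe></root>"
--     elif not parts["CTe"]:
--         xml += f"<cteProc><infCte>{inner}</infCte></cteProc>"
--     elif not parts["infCte"]:
--         xml += f"<cteProc><CTe>{inner}</CTe></cteProc>"
--     else:
--         xml += f"<cteProc><CTe><infCte>{inner}</infCte></CTe></cteProc>"
--
--     return xml
-- ===== SOURCE B (Python) =====
-- def _build_xml_missing(element: str) -> str:
--     """Build XML with a specific required element removed."""
--     inner = "".join(
--         f"<{t}/>"
--         for t in ["ide", "emit", "rem", "vPrest", "imp", "infCTeNorm"]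
--         if t != element
--     )
--     kept = [w for w in ["cteProc", "CTe", "infCte"] if w != element]
--     if element == "cteProc":
--         kept = ["root"] + kept
--     content = inner
--     for w in reversed(kept):
--         content = f"<{w}>{content}</{w}>"
--     return '<?xml version="1.0" encoding="UTF-8"?>' + content
-- ===== Notes on version B (the rewrite author's own statement) =====
-- stated objective: simpler
-- what changed: Replaces the membership dict and the 4-way if/elif over hard-coded nesting templates with a filtered list of wrapper tags folded from innermost outward, plus a join-comprehension for the leaf tags.
import Mathlib
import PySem

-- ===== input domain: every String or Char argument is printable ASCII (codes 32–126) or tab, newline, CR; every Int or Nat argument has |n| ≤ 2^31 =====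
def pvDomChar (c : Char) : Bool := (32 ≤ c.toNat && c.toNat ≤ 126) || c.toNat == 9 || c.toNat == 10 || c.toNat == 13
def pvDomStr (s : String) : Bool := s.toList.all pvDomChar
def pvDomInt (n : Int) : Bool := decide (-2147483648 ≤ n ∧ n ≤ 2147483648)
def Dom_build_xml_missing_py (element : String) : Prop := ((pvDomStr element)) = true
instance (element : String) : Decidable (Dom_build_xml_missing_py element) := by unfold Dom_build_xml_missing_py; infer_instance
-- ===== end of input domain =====

-- B replaces the if/elif over hard-coded nesting templates by a fold over the kept wrapper tags (objective: simpler).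
-- ===== PORT A =====
def build_xml_missing_py (element : String) : String :=
  let parts : PySem.Dict String Bool := PySem.Dict.ofList
    [("cteProc", true), ("CTe", true), ("infCte", true), ("ide", true),
     ("emit", true), ("rem", true), ("vPrest", true), ("imp", true), ("infCTeNorm", true)]
  let parts := parts.insert element false
  let inner := ["ide", "emit", "rem", "vPrest", "imp", "infCTeNorm"].foldl
    (fun acc tag => if parts.getD tag false then acc ++ "<" ++ tag ++ "/>" else acc) ""
  let xml := "<?xml version=\"1.0\" encoding=\"UTF-8\"?>"
  if !(parts.getD "cteProc" false) then
    xml ++ "<root><CTe><infCte>" ++ inner ++ "</infCte></CTe></root>"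
  else if !(parts.getD "CTe" false) then
    xml ++ "<cteProc><infCte>" ++ inner ++ "</infCte></cteProc>"
  else if !(parts.getD "infCte" false) then
    xml ++ "<cteProc><CTe>" ++ inner ++ "</CTe></cteProc>"
  else
    xml ++ "<cteProc><CTe><infCte>" ++ inner ++ "</infCte></CTe></cteProc>"

-- ===== PORT B =====
def build_xml_missing_py_alt (element : String) : String :=
  let inner := String.join ((["ide", "emit", "rem", "vPrest", "imp", "infCTeNorm"].filter
    (fun t => t ≠ element)).map (fun t => "<" ++ t ++ "/>"))
  let kept := ["cteProc", "CTe", "infCte"].filter (fun w => w ≠ element)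
  let kept := if element = "cteProc" then "root" :: kept else kept
  let content := kept.reverse.foldl (fun c w => "<" ++ w ++ ">" ++ c ++ "</" ++ w ++ ">") inner
  "<?xml version=\"1.0\" encoding=\"UTF-8\"?>" ++ content

-- ===== PRECONDITION & SPEC =====
def Spec_build_xml_missing_py (element : String) (out : String) : Prop := out = build_xml_missing_py_alt element
instance (element : String) (out : String) : Decidable (Spec_build_xml_missing_py element out) := by unfold Spec_build_xml_missing_py; infer_instance

-- ===== CLAIM (what is proved, stated in full; the proofs are below) =====
def Claim_equal_build_xml_missing_py : Prop := ∀ (element : String), Dom_build_xml_missing_py element → Spec_build_xml_missing_py element (build_xml_missing_py element)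

-- ===== LEMMAS AND PROOFS =====

-- ===== VERDICT (by name: the statement is the Claim_ definition above) =====
theorem build_xml_missing_py_spec : Claim_equal_build_xml_missing_py := by
  intro element _
  unfold Spec_build_xml_missing_py
  by_cases h1 : element = "cteProc"; · subst h1; decide
  by_cases h2 : element = "CTe"; · subst h2; decide
  by_cases h3 : element = "infCte"; · subst h3; decide
  by_cases h4 : element = "ide"; · subst h4; decide
  by_cases h5 : element = "emit"; · subst h5; decide
  by_cases h6 : element = "rem"; · subst h6; decide
  by_cases h7 : element = "vPrest"; · subst h7; decide
  by_cases h8 : element = "imp"; · subst h8; decide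
  by_cases h9 : element = "infCTeNorm"; · subst h9; decide
  simp only [build_xml_missing_py, build_xml_missing_py_alt, PySem.Dict.getD_insert,
    List.foldl, List.filter, List.reverse,
    if_neg (Ne.symm h1), if_neg (Ne.symm h2), if_neg (Ne.symm h3), if_neg (Ne.symm h4),
    if_neg (Ne.symm h5), if_neg (Ne.symm h6), if_neg (Ne.symm h7), if_neg (Ne.symm h8),
    if_neg (Ne.symm h9)]
  simp [h1, Ne.symm h1, Ne.symm h2, Ne.symm h3,
    Ne.symm h4, Ne.symm h5, Ne.symm h6, Ne.symm h7, Ne.symm h8, Ne.symm h9,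
    String.join, PySem.Dict.ofList,
    PySem.Dict.update, PySem.Dict.empty, PySem.Dict.getD, PySem.Dict.get?,
    PySem.Dict.insert, PySem.Dict.contains, List.find?]
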